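-- pv_equiv track=rewrite | github.com/meanang123/prmax | prmax/prmax/utilities3/common/string.py | splitoutletname
-- ===== SOURCE A (Python) =====
-- _remove = u'()"'
--
-- SplitCharList = u";:,/-"
--
-- REPLACEWITHSPACE = (u'\t', )
--
-- def splitoutletname(name):
-- 	""" Split an outlet name into a list of words"""
--
-- 	for c in _remove:
-- 		name = name.replace(c, u"")
--
-- 	for c in REPLACEWITHSPACE:
-- 		name = name.replace(c, u" ")
--
-- 	for c in SplitCharList:
-- 		name = name.replace(c, u" ")
--
-- 	res = name.lower().split()
--
-- 	#res = bytearray(res,'utf8')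
--
-- 	return res
-- ===== SOURCE B (Python) =====
-- def splitoutletname(name):
-- 	""" Split an outlet name into a list of words"""
-- 	# single pass: drop removable chars, turn separators into spaces, then lower+split
-- 	cleaned = ''.join(' ' if c in ';:,/-\t' else c for c in name if c not in '()"')
-- 	return cleaned.lower().split()
-- ===== Notes on version B (the rewrite author's own statement) =====
-- stated objective: simpler
-- what changed: Replaces A's nine full-string .replace() scans with a single pass over the characters (a join over one comprehension that drops removable characters and maps separators to spaces), keeping the final .lower().split().
import Mathlib
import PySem

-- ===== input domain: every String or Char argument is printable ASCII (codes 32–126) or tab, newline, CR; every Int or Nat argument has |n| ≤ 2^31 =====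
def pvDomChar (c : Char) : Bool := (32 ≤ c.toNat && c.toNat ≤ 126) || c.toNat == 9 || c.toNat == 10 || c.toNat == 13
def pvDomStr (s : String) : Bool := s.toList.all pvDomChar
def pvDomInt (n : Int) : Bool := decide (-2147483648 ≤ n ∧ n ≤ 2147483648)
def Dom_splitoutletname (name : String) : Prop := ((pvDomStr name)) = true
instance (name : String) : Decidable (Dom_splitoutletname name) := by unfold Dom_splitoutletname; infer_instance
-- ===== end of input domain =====

-- B replaces A's nine full-string replace scans with one single pass over the characters (simpler); return value only.

-- ===== PORT A =====
def pvRemoveA : List Char := ['(', ')', '"']                  -- _remove = u'()"'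
def pvReplaceWithSpaceA : List String := ["\t"]               -- REPLACEWITHSPACE = (u'\t',)
def pvSplitCharListA : List Char := [';', ':', ',', '/', '-'] -- SplitCharList = u";:,/-"

def splitoutletname (name : String) : List String :=
  let n1 := pvRemoveA.foldl (fun s c => PySem.Str.replace s (String.ofList [c]) "") name
  let n2 := pvReplaceWithSpaceA.foldl (fun s c => PySem.Str.replace s c " ") n1
  let n3 := pvSplitCharListA.foldl (fun s c => PySem.Str.replace s (String.ofList [c]) " ") n2
  PySem.Str.split₀ (PySem.Str.lower n3)

-- ===== PORT B =====
def pvSepsB : List Char := [';', ':', ',', '/', '-', '\t']         -- ';:,/-\t'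

def splitoutletname_alt (name : String) : List String :=
  let buf := (name.toList.filter (fun c => !(decide (c ∈ ['(', ')', '"'])))).map
      (fun c => if c ∈ pvSepsB then ' ' else c)
  PySem.Str.split₀ (PySem.Str.lower (String.ofList buf))

-- ===== PRECONDITION & SPEC =====
def Spec_splitoutletname (name : String) (out : List String) : Prop := out = splitoutletname_alt name
instance (name : String) (out : List String) : Decidable (Spec_splitoutletname name out) := by unfold Spec_splitoutletname; infer_instance

-- ===== CLAIM (what is proved, stated in full; the proofs are below) =====
def Claim_equal_splitoutletname : Prop := ∀ (name : String), Dom_splitoutletname name → Spec_splitoutletname name (splitoutletname name)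

-- ===== LEMMAS AND PROOFS =====

-- replacing a single-character needle is a per-character flatMap
lemma replace_go_single (a : Char) (new : List Char) :
    ∀ (cs : List Char) (fuel : Nat) (acc : List Char), cs.length ≤ fuel →
      PySem.Chars.replace.go [a] new fuel cs acc
        = acc.reverse ++ cs.flatMap (fun c => if c = a then new else [c]) := by
  intro cs
  induction cs with
  | nil =>
      intro fuel acc _
      cases fuel <;> simp [PySem.Chars.replace.go]
  | cons c t ih =>
      intro fuel acc h
      cases fuel with
      | zero => simp at h
      | succ f =>
          by_cases hc : c = a
          · subst hc
            have hpre : [c].isPrefixOf (c :: t) = true := by simp [List.isPrefixOf]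
            simp only [PySem.Chars.replace.go, hpre, if_true, List.length_cons,
              List.drop_succ_cons, List.length_nil, List.drop_zero]
            rw [ih f (new.reverse ++ acc) (by simpa using h)]
            simp
          · have hpre : [a].isPrefixOf (c :: t) = false := by
              simp [List.isPrefixOf, Ne.symm hc]
            simp only [PySem.Chars.replace.go, hpre, Bool.false_eq_true, if_false]
            rw [ih f (c :: acc) (by simpa using h)]
            simp [hc]

lemma replace_single (cs : List Char) (a : Char) (new : List Char) :
    PySem.Chars.replace cs [a] new = cs.flatMap (fun c => if c = a then new else [c]) := by
  unfold PySem.Chars.replace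
  simp only [List.isEmpty_cons, Bool.false_eq_true, if_false]
  simpa using replace_go_single a new cs cs.length [] le_rfl

-- deleting one character is a filter
lemma replace_del (cs : List Char) (a : Char) :
    PySem.Chars.replace cs [a] [] = cs.filter (fun c => !(c == a)) := by
  rw [replace_single]
  induction cs with
  | nil => rfl
  | cons c t ih => by_cases hc : c = a <;> simp [hc, ih]

-- substituting one character by a space is a map
lemma replace_sub (cs : List Char) (a : Char) :
    PySem.Chars.replace cs [a] [' '] = cs.map (fun c => if c = a then ' ' else c) := by
  rw [replace_single]
  induction cs with
  | nil => rfl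
  | cons c t ih => by_cases hc : c = a <;> simp [hc, ih]

-- ===== VERDICT (by name: the statement is the Claim_ definition above) =====
set_option maxHeartbeats 1000000 in
theorem splitoutletname_spec : Claim_equal_splitoutletname := by
  intro name _
  unfold Spec_splitoutletname splitoutletname splitoutletname_alt
  simp only [pvRemoveA, pvReplaceWithSpaceA, pvSplitCharListA,
    List.foldl_cons, List.foldl_nil]
  refine congrArg _ (congrArg _ (String.toList_inj.mp ?_))
  simp only [PySem.Str.toList_replace, String.toList_ofList]
  rw [show ("" : String).toList = [] from rfl, show (" " : String).toList = [' '] from rfl,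
    show ("\t" : String).toList = ['\t'] from rfl]
  rw [replace_del, replace_del, replace_del, replace_sub, replace_sub, replace_sub,
    replace_sub, replace_sub, replace_sub]
  simp only [List.filter_filter, List.map_map]
  congr 1
  · funext a
    simp only [Function.comp]
    by_cases h : a ∈ pvSepsB
    · rw [if_pos h]
      simp only [pvSepsB, List.mem_cons, List.not_mem_nil, or_false] at h
      rcases h with rfl | rfl | rfl | rfl | rfl | rfl <;> rfl
    · rw [if_neg h]
      simp only [pvSepsB, List.mem_cons, List.not_mem_nil, or_false, not_or] at h
      obtain ⟨n1, n2, n3, n4, n5, n6⟩ := h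
      simp [n1, n2, n3, n4, n5, n6]
  · congr 1
    funext a
    by_cases h : a ∈ ['(', ')', '"']
    · simp only [List.mem_cons, List.not_mem_nil, or_false] at h
      rcases h with rfl | rfl | rfl <;> rfl
    · have hd : decide (a ∈ ['(', ')', '"']) = false := by simpa using h
      rw [hd]
      simp only [List.mem_cons, List.not_mem_nil, or_false, not_or] at h
      obtain ⟨n1, n2, n3⟩ := h
      simp [n1, n2, n3]
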